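-- pv_equiv track=rewrite | github.com/costas-basdekis/advent-of-code-submissions | year_2019/day_03/part_a.py | move_and_add_points
-- ===== SOURCE A (Python) =====
-- MOVE_MULTIPLIERS = {
--     'R': (1, 0),
--     'L': (-1, 0),
--     'U': (0, -1),
--     'D': (0, 1),
-- }
--
-- def move_and_add_points(position, move_text, points):
--     """
--     >>> move_and_add_points((0, 0), "R1", [])
--     ((1, 0), [(1, 0)])
--     >>> move_and_add_points((0, 0), "R4", [])
--     ((4, 0), [(1, 0), (2, 0), (3, 0), (4, 0)])
--     >>> move_and_add_points((0, 0), "L4", [])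
--     ((-4, 0), [(-1, 0), (-2, 0), (-3, 0), (-4, 0)])
--     >>> move_and_add_points((0, 0), "U4", [])
--     ((0, -4), [(0, -1), (0, -2), (0, -3), (0, -4)])
--     >>> move_and_add_points((0, 0), "D4", [])
--     ((0, 4), [(0, 1), (0, 2), (0, 3), (0, 4)])
--     """
--     move_direction_text, distance_text = move_text[0], move_text[1:]
--     if move_direction_text not in MOVE_MULTIPLIERS:
--         raise Exception(f"Unknown direction '{move_direction_text}'")
--     move_multiplier_x, move_multiplier_y = MOVE_MULTIPLIERS[move_direction_text]
--     distance = int(distance_text)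
--     for _ in range(distance):
--         x, y = position
--         position = (
--             x + move_multiplier_x,
--             y + move_multiplier_y,
--         )
--         points.append(position)
--     return position, points
-- ===== SOURCE B (Python) =====
-- MOVE_MULTIPLIERS = {
--     'R': (1, 0),
--     'L': (-1, 0),
--     'U': (0, -1),
--     'D': (0, 1),
-- }
--
-- def move_and_add_points(position, move_text, points):
--     multiplier = MOVE_MULTIPLIERS.get(move_text[0])
--     if multiplier is None:
--         raise Exception(f"Unknown direction '{move_text[0]}'")
--     mx, my = multiplier
--     distance = int(move_text[1:])
--     x0, y0 = position
--     segment = [(x0 + i * mx, y0 + i * my) for i in range(1, distance + 1)]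
--     points.extend(segment)
--     return (segment[-1] if segment else position), points
-- ===== Notes on version B (the rewrite author's own statement) =====
-- stated objective: alternative
-- what changed: A walks a running position one unit at a time, appending each intermediate value of the accumulator; B has no running position: it generates the whole segment at once by index arithmetic (x0+i*mx, y0+i*my), extends the list with it, and reads the final position off the segment's last element. Pre_ excludes only the inputs where A raises (empty move_text, unknown direction, unparsable distance).
import Mathlib
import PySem

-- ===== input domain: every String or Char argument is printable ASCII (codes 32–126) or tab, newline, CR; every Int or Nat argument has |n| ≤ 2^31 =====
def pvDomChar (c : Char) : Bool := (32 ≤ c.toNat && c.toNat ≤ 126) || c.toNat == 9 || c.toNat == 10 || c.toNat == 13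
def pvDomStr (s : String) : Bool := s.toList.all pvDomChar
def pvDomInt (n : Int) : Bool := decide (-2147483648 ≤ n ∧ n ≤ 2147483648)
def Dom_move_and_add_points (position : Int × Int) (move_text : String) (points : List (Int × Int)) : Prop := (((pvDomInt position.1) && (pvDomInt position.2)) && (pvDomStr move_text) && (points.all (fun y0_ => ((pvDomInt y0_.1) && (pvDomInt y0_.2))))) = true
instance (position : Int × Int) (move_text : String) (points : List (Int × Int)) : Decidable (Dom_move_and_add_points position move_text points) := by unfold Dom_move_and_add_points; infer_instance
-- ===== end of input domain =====

-- Equivalence of the RETURN value; in Python both A and B mutate `points` in place identically.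
-- B drops A's running-position accumulator: it generates the whole segment by index arithmetic
-- and reads the final position off the segment's last element (objective: alternative).

-- ===== PORT A =====
-- MOVE_MULTIPLIERS; keys are the one-character direction strings, modelled by their single Char
def MOVE_MULTIPLIERS : PySem.Dict Char (Int × Int) :=
  PySem.Dict.ofList [('R', (1, 0)), ('L', (-1, 0)), ('U', (0, -1)), ('D', (0, 1))]

def move_and_add_points (position : Int × Int) (move_text : String) (points : List (Int × Int)) : (Int × Int) × (List (Int × Int)) :=
  match PySem.Str.pyGet? move_text 0 with          -- move_text[0]; none = IndexError, excluded by Pre_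
  | none => (position, points)
  | some move_direction_text =>
    match PySem.Dict.get? MOVE_MULTIPLIERS move_direction_text with   -- membership test + lookup; none = raise, excluded by Pre_
    | none => (position, points)
    | some (move_multiplier_x, move_multiplier_y) =>
      match PySem.Int.ofStr? (PySem.Str.slice move_text (some 1) none) with  -- int(move_text[1:]); none = ValueError, excluded by Pre_
      | none => (position, points)
      | some distance =>
        (PySem.List.pyRange 0 distance 1).foldl
          (fun st _ =>
            ((st.1.1 + move_multiplier_x, st.1.2 + move_multiplier_y),
             st.2 ++ [(st.1.1 + move_multiplier_x, st.1.2 + move_multiplier_y)]))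
          (position, points)

-- ===== PORT B =====
-- the comprehension [(x0 + i*mx, y0 + i*my) for i in range(1, distance+1)]
def wireSegment (x0 y0 mx my distance : Int) : List (Int × Int) :=
  (PySem.List.pyRange 1 (distance + 1) 1).map (fun i => (x0 + i * mx, y0 + i * my))

def move_and_add_points_alt (position : Int × Int) (move_text : String) (points : List (Int × Int)) : (Int × Int) × (List (Int × Int)) :=
  match PySem.Str.pyGet? move_text 0 with          -- move_text[0]; none = IndexError, excluded by Pre_
  | none => (position, points)
  | some c =>
    match PySem.Dict.get? MOVE_MULTIPLIERS c with  -- MOVE_MULTIPLIERS.get(...); None = raise, excluded by Pre_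
    | none => (position, points)
    | some mult =>
      match PySem.Int.ofStr? (PySem.Str.slice move_text (some 1) none) with  -- int(move_text[1:]); none = ValueError, excluded by Pre_
      | none => (position, points)
      | some distance =>
        let segment := wireSegment position.1 position.2 mult.1 mult.2 distance
        -- segment[-1] if segment else position  (pyGet? xs (-1) = getLast?)
        (segment.getLast?.getD position, points ++ segment)

-- ===== PRECONDITION & SPEC =====
-- Pre_ excludes exactly the inputs on which A raises: empty move_text (IndexError),
-- a first character other than R/L/U/D (explicit raise), and a tail int() cannot parse (ValueError).
def Pre_move_and_add_points (position : Int × Int) (move_text : String) (points : List (Int × Int)) : Prop :=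
  (move_text.toList.head? = some 'R' ∨ move_text.toList.head? = some 'L' ∨
   move_text.toList.head? = some 'U' ∨ move_text.toList.head? = some 'D') ∧
  (PySem.Int.ofChars? move_text.toList.tail).isSome = true
instance (position : Int × Int) (move_text : String) (points : List (Int × Int)) : Decidable (Pre_move_and_add_points position move_text points) := by unfold Pre_move_and_add_points; infer_instance

def pvWitness_move_and_add_points : (Int × Int) × String × (List (Int × Int)) := ((0, 0), "R4", [])

def Spec_move_and_add_points (position : Int × Int) (move_text : String) (points : List (Int × Int)) (out : (Int × Int) × (List (Int × Int))) : Prop := out = move_and_add_points_alt position move_text points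
instance (position : Int × Int) (move_text : String) (points : List (Int × Int)) (out : (Int × Int) × (List (Int × Int))) : Decidable (Spec_move_and_add_points position move_text points out) := by unfold Spec_move_and_add_points; infer_instance

-- ===== CLAIM (what is proved, stated in full; the proofs are below) =====
def Claim_equal_move_and_add_points : Prop := ∀ (position : Int × Int) (move_text : String) (points : List (Int × Int)), Dom_move_and_add_points position move_text points → Pre_move_and_add_points position move_text points → Spec_move_and_add_points position move_text points (move_and_add_points position move_text points)

-- ===== LEMMAS AND PROOFS =====

-- A's loop, over any index list: it only uses the list's length.
lemma loopA_eq (mx my : Int) : ∀ (l : List Int) (x y : Int) (pts : List (Int × Int)),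
    l.foldl
      (fun (st : (Int × Int) × List (Int × Int)) (_ : Int) =>
        ((st.1.1 + mx, st.1.2 + my), st.2 ++ [(st.1.1 + mx, st.1.2 + my)]))
      ((x, y), pts)
    = ((x + (l.length : Int) * mx, y + (l.length : Int) * my),
       pts ++ (List.range l.length).map (fun (k : Nat) => (x + ((k : Int) + 1) * mx, y + ((k : Int) + 1) * my))) := by
  intro l
  induction l with
  | nil => intro x y pts; simp
  | cons a t ih =>
    intro x y pts
    rw [List.foldl_cons, ih]
    simp only [List.length_cons, List.range_succ_eq_map, List.map_cons, List.map_map,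
      List.append_assoc, List.singleton_append, Prod.mk.injEq]
    refine ⟨⟨by push_cast; ring, by push_cast; ring⟩, ?_⟩
    congr 1
    congr 1
    · simp only [Prod.mk.injEq]
      constructor <;> · push_cast; ring
    · apply List.map_congr_left
      intro k _
      simp only [Function.comp_apply, Prod.mk.injEq]
      constructor <;> · push_cast; ring

-- B's comprehension, re-indexed from 0
lemma wireSegment_eq (x0 y0 mx my d : Int) :
    wireSegment x0 y0 mx my d
      = (List.range d.toNat).map (fun (k : Nat) => (x0 + ((k : Int) + 1) * mx, y0 + ((k : Int) + 1) * my)) := by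
  unfold wireSegment
  rw [PySem.List.pyRange_one 1 (d + 1), List.map_map]
  have : (d + 1 - 1).toNat = d.toNat := by omega
  rw [this]
  apply List.map_congr_left
  intro k _
  simp only [Function.comp_apply, Prod.mk.injEq]
  constructor <;> ring

-- the two branch bodies agree
lemma branches_eq (x0 y0 mx my distance : Int) (points : List (Int × Int)) :
    (PySem.List.pyRange 0 distance 1).foldl
      (fun (st : (Int × Int) × List (Int × Int)) (_ : Int) =>
        ((st.1.1 + mx, st.1.2 + my), st.2 ++ [(st.1.1 + mx, st.1.2 + my)]))
      ((x0, y0), points)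
    = ((wireSegment x0 y0 mx my distance).getLast?.getD (x0, y0),
       points ++ wireSegment x0 y0 mx my distance) := by
  rw [loopA_eq, wireSegment_eq]
  have hlen : (PySem.List.pyRange 0 distance 1).length = distance.toNat := by
    rw [PySem.List.length_pyRange_one]; omega
  rw [hlen]
  rcases Nat.eq_zero_or_eq_succ_pred distance.toNat with h | h
  · rw [h]; simp
  · rw [h, List.range_succ, List.map_append, List.map_cons, List.map_nil,
      List.getLast?_concat]
    have : ((distance.toNat - 1 : Nat) : Int) + 1 = (distance.toNat : Int) := by omega
    simp [this]

-- ===== VERDICT (by name: the statement is the Claim_ definition above) =====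
theorem move_and_add_points_spec : Claim_equal_move_and_add_points := by
  intro position move_text points _hdom hpre
  obtain ⟨hdir, hparse⟩ := hpre
  unfold Spec_move_and_add_points move_and_add_points move_and_add_points_alt
  have hget : PySem.Str.pyGet? move_text 0 = move_text.toList.head? := by
    rw [show (0:Int) = ((0:Nat):Int) from rfl, PySem.Str.pyGet?_natCast]
    simp [List.head?_eq_getElem?]
  have hslice : (PySem.Str.slice move_text (some 1) none).toList = move_text.toList.tail := by
    have := PySem.Chars.slice_eq_listSlice move_text.toList (some 1) none
    simp [PySem.Str.slice, PySem.List.slice_from_one]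
  have hof : PySem.Int.ofStr? (PySem.Str.slice move_text (some 1) none)
      = PySem.Int.ofChars? move_text.toList.tail := by
    rw [← hslice]; rfl
  obtain ⟨d, hd⟩ : ∃ d, PySem.Int.ofChars? move_text.toList.tail = some d := by
    cases h : PySem.Int.ofChars? move_text.toList.tail with
    | none => rw [h] at hparse; simp at hparse
    | some d => exact ⟨d, rfl⟩
  rcases hdir with h | h | h | h <;> rw [hget, h, hof, hd] <;>
    exact branches_eq position.1 position.2 _ _ d points
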